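-- pv_equiv track=rewrite | github.com/syurskyi/Algorithms_and_Data_Structure | _algorithms_challenges/projecteuler/ProjectEuler-master(2)/ProjectEuler-master/346.py | generate_repunits
-- ===== SOURCE A (Python) =====
-- PROBLEM_BOUND = 10**12
--
-- def get_number(rep, base):
--     number = 0
--     for digit in rep:
--         number *= base
--         number += int(digit)
--     return number
--
-- def generate_repunits(base):
--     repunits = []
--     for n in range(3, 40):
--         number = get_number('1' * n, base)
--         if number > PROBLEM_BOUND:
--             break
--         repunits.append(number)
--     return repunits
-- ===== SOURCE B (Python) =====
-- PROBLEM_BOUND = 10**12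
--
-- def generate_repunits(base):
--     repunits = []
--     number = base * base + base + 1
--     for n in range(3, 40):
--         if number > PROBLEM_BOUND:
--             break
--         repunits.append(number)
--         number = number * base + 1
--     return repunits
-- ===== Notes on version B (the rewrite author's own statement) =====
-- stated objective: simpler
-- what changed: Replaces the nested loops (outer over lengths, inner get_number re-digesting the string '1'*n digit by digit) with a single pass that carries the previous repunit and updates it by number = number*base + 1.
import Mathlib
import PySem

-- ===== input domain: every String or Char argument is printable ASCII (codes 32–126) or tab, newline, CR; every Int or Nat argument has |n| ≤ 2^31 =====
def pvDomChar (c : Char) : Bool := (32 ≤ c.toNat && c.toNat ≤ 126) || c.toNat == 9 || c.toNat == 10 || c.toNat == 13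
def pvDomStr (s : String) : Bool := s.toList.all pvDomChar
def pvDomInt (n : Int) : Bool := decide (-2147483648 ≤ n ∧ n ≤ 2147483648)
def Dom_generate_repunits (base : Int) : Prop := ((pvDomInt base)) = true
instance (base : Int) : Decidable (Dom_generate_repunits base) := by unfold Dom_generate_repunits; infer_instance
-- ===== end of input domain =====

-- B drops the get_number helper that re-digests the string '1'*n from scratch for every n and
-- instead carries the previous repunit through one pass, updating number = number*base + 1 (simpler).

def PROBLEM_BOUND : Int := 10 ^ 12

-- ===== PORT A =====
-- int(digit) is ported with PySem.Int.ofChars? on the one-character string; the digits here are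
-- always '1', so the ValueError case (none) is never reached and .getD 0 is never taken.
def get_number (rep : List Char) (base : Int) : Int :=
  rep.foldl (fun number digit => number * base + (PySem.Int.ofChars? [digit]).getD 0) 0

-- the for-loop over range(3, 40) with its break, as structural recursion on the range list
def loopA (base : Int) : List Int → List Int → List Int
  | [], repunits => repunits
  | n :: rest, repunits =>
    let number := get_number (List.replicate n.toNat '1') base
    if number > PROBLEM_BOUND then repunits
    else loopA base rest (repunits ++ [number])

def generate_repunits (base : Int) : List Int :=
  loopA base (PySem.List.pyRange 3 40 1) []

-- ===== PORT B =====
def loopB (base : Int) : List Int → Int → List Int → List Int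
  | [], _, repunits => repunits
  | _ :: rest, number, repunits =>
    if number > PROBLEM_BOUND then repunits
    else loopB base rest (number * base + 1) (repunits ++ [number])

def generate_repunits_alt (base : Int) : List Int :=
  loopB base (PySem.List.pyRange 3 40 1) (base * base + base + 1) []

-- ===== PRECONDITION & SPEC =====
def Spec_generate_repunits (base : Int) (out : List Int) : Prop := out = generate_repunits_alt base
instance (base : Int) (out : List Int) : Decidable (Spec_generate_repunits base out) := by unfold Spec_generate_repunits; infer_instance

-- ===== CLAIM (what is proved, stated in full; the proofs are below) =====
def Claim_equal_generate_repunits : Prop := ∀ (base : Int), Dom_generate_repunits base → Spec_generate_repunits base (generate_repunits base)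

-- ===== LEMMAS AND PROOFS =====

theorem ofChars_one : (PySem.Int.ofChars? ['1']).getD 0 = 1 := by decide

-- the value A computes for length n: get_number('1'*n, base)
def g (base : Int) (m : Nat) : Int := get_number (List.replicate m '1') base

theorem g_succ (base : Int) (m : Nat) : g base (m + 1) = g base m * base + 1 := by
  simp [g, get_number, List.replicate_succ' (n := m), List.foldl_append, ofChars_one]

theorem g_three (base : Int) : g base 3 = base * base + base + 1 := by
  simp [g, get_number, List.replicate, ofChars_one]; ring

theorem loop_eq (base : Int) : ∀ (len m : Nat) (acc : List Int),
    loopA base ((List.range' m len).map Int.ofNat) acc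
      = loopB base ((List.range' m len).map Int.ofNat) (g base m) acc := by
  intro len
  induction len with
  | zero => intro m acc; rfl
  | succ len ih =>
    intro m acc
    rw [List.range'_succ, List.map_cons]
    show (if g base m > PROBLEM_BOUND then acc
          else loopA base ((List.range' (m + 1) len).map Int.ofNat) (acc ++ [g base m]))
        = (if g base m > PROBLEM_BOUND then acc
          else loopB base ((List.range' (m + 1) len).map Int.ofNat) (g base m * base + 1) (acc ++ [g base m]))
    by_cases h : g base m > PROBLEM_BOUND
    · rw [if_pos h, if_pos h]
    · rw [if_neg h, if_neg h, ← g_succ]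
      exact ih (m + 1) (acc ++ [g base m])

theorem pyRange_3_40 : PySem.List.pyRange 3 40 1 = (List.range' 3 37).map Int.ofNat := by
  decide

-- ===== VERDICT (by name: the statement is the Claim_ definition above) =====
theorem generate_repunits_spec : Claim_equal_generate_repunits := by
  intro base _
  show generate_repunits base = generate_repunits_alt base
  rw [generate_repunits, generate_repunits_alt, pyRange_3_40, loop_eq, g_three]
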